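-- pv_equiv track=rewrite | github.com/chuoer47/AlgorithmLearning | 常见模板/数学知识/几何计算/多边形/梯形计数算法模板.py | _count_parallelograms
-- ===== SOURCE A (Python) =====
-- from collections import defaultdict
-- from typing import List
-- from math import gcd
--
-- def _normalize_slope(p1: tuple, p2: tuple) -> tuple:
--     """
--     内部工具：计算两点构成直线的标准化斜率（最简分数形式，分母为正）
--     - 垂直线（dx=0）：返回 (0, 1) 表示无穷大斜率
--     - 水平线（dy=0）：返回 (1, 0) 表示斜率为0
--     """
--     x1, y1 = p1
--     x2, y2 = p2
--     dx = x2 - x1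
--     dy = y2 - y1
--
--     if dx == 0:
--         return (0, 1)
--     if dy == 0:
--         return (1, 0)
--
--     # 化简为最简分数，保证分母为正
--     g = gcd(abs(dy), abs(dx))
--     numerator, denominator = dy // g, dx // g
--     if denominator < 0:
--         numerator, denominator = -numerator, -denominator
--
--     return (numerator, denominator)
--
-- def _calc_combination_pairs(count_list: List[int]) -> tuple:
--     """
--     内部工具：预处理组合数
--     返回：(总边对数, 共线边对数)
--     - 总边对数：C(总边数, 2)
--     - 共线边对数：求和 C(单条直线的边数, 2)
--     """
--     total_edges = sum(count_list)
--     total_pairs = total_edges * (total_edges - 1) // 2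
--     collinear_pairs = sum(e * (e - 1) // 2 for e in count_list)
--     return total_pairs, collinear_pairs
--
-- def _count_parallelograms(points: List[List[int]]) -> int:
--     """内部工具：统计点集中平行四边形的数量（排除共线情况）"""
--     n = len(points)
--     if n < 4:
--         return 0
--
--     # 键：中点(2x,2y)（避免浮点数）；值：{斜率: 该中点+斜率的边数}
--     mid_slope_counter = defaultdict(lambda: defaultdict(int))
--
--     for i in range(n):
--         p1 = (points[i][0], points[i][1])
--         for j in range(i + 1, n):
--             p2 = (points[j][0], points[j][1])
--             mid = (p1[0] + p2[0], p1[1] + p2[1])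
--             slope = _normalize_slope(p1, p2)
--             mid_slope_counter[mid][slope] += 1
--
--     total = 0
--     for mid in mid_slope_counter:
--         slope_counts = list(mid_slope_counter[mid].values())
--         total_pairs, collinear_pairs = _calc_combination_pairs(slope_counts)
--         total += (total_pairs - collinear_pairs)
--
--     return total
-- ===== SOURCE B (Python) =====
-- from collections import defaultdict
-- from typing import List
-- from math import gcd
--
--
-- def _normalize_slope(p1: tuple, p2: tuple) -> tuple:
--     x1, y1 = p1
--     x2, y2 = p2
--     dx = x2 - x1
--     dy = y2 - y1
--     if dx == 0:
--         return (0, 1)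
--     if dy == 0:
--         return (1, 0)
--     g = gcd(abs(dy), abs(dx))
--     numerator, denominator = dy // g, dx // g
--     if denominator < 0:
--         numerator, denominator = -numerator, -denominator
--     return (numerator, denominator)
--
--
-- def _count_parallelograms(points: List[List[int]]) -> int:
--     """Single fused pass: for each segment, add the number of previously seen
--     segments sharing its midpoint but not its slope, then record it."""
--     n = len(points)
--     if n < 4:
--         return 0
--
--     mid_total = defaultdict(int)       # midpoint -> segments seen
--     mid_slope = defaultdict(int)       # (midpoint, slope) -> segments seen
--     total = 0
--     for i in range(n):
--         p1 = (points[i][0], points[i][1])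
--         for j in range(i + 1, n):
--             p2 = (points[j][0], points[j][1])
--             mid = (p1[0] + p2[0], p1[1] + p2[1])
--             slope = _normalize_slope(p1, p2)
--             total += mid_total[mid] - mid_slope[(mid, slope)]
--             mid_total[mid] += 1
--             mid_slope[(mid, slope)] += 1
--     return total
-- ===== Notes on version B (the rewrite author's own statement) =====
-- stated objective: alternative
-- what changed: The second pass over the midpoint dictionary and the C(n,2)-minus-collinear combinatorial identity are eliminated: B counts online during the single pair loop, adding for each segment the number of previously seen segments with the same midpoint but a different slope, maintained in two flat counters.
import Mathlib
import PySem

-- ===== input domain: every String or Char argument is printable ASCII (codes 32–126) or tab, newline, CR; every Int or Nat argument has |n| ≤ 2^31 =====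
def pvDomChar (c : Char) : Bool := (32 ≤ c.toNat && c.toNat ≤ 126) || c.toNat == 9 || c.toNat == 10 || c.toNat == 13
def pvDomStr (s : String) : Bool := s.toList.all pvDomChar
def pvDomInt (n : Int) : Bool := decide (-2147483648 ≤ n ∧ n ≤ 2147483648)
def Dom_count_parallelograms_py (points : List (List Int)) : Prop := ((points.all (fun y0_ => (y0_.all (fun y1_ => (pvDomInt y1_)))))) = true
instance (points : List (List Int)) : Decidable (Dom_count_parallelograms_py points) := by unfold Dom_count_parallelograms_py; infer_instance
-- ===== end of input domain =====

-- B replaces A's second pass over the midpoint dictionary (and its C(n,2)-minus-collinear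
-- subtraction) by online accumulation inside the single pair loop; same asymptotic cost.

-- ===== PORT A =====
-- port of _normalize_slope (shared helper of both Pythons, copied verbatim in Source B)
def normalize_slope (p1 p2 : Int × Int) : Int × Int :=
  let dx := p2.1 - p1.1
  let dy := p2.2 - p1.2
  if dx = 0 then (0, 1)
  else if dy = 0 then (1, 0)
  else
    -- math.gcd(abs(dy), abs(dx)) = Int.gcd dy dx (gcd of absolute values)
    let g : Int := (Int.gcd dy dx : Int)
    let numerator := PySem.Int.floordiv dy g
    let denominator := PySem.Int.floordiv dx g
    if denominator < 0 then (-numerator, -denominator) else (numerator, denominator)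

-- port of _calc_combination_pairs
def calc_combination_pairs (count_list : List Int) : Int × Int :=
  let total_edges := count_list.sum
  let total_pairs := PySem.Int.floordiv (total_edges * (total_edges - 1)) 2
  let collinear_pairs := (count_list.map (fun e => PySem.Int.floordiv (e * (e - 1)) 2)).sum
  (total_pairs, collinear_pairs)

def count_parallelograms_py (points : List (List Int)) : Int :=
  let n : Int := PySem.List.len points
  if n < 4 then 0
  else
    let counter : PySem.Dict (Int × Int) (PySem.Dict (Int × Int) Int) :=
      (PySem.List.pyRange 0 n 1).foldl (fun d i =>
        let pi := PySem.List.pyGetD points i []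
        let p1 : Int × Int := (PySem.List.pyGetD pi 0 0, PySem.List.pyGetD pi 1 0)
        (PySem.List.pyRange (i + 1) n 1).foldl (fun d j =>
          let pj := PySem.List.pyGetD points j []
          let p2 : Int × Int := (PySem.List.pyGetD pj 0 0, PySem.List.pyGetD pj 1 0)
          let mid := (p1.1 + p2.1, p1.2 + p2.2)
          let slope := normalize_slope p1 p2
          d.modify mid PySem.Dict.empty (fun inner => inner.modify slope 0 (· + 1))) d)
        PySem.Dict.empty
    counter.keys.foldl (fun total mid =>
      let slope_counts := (counter.getD mid PySem.Dict.empty).values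
      let pr := calc_combination_pairs slope_counts
      total + (pr.1 - pr.2)) 0

-- ===== PORT B =====
def count_parallelograms_py_alt (points : List (List Int)) : Int :=
  let n : Int := PySem.List.len points
  if n < 4 then 0
  else
    let st : PySem.Dict (Int × Int) Int × PySem.Dict ((Int × Int) × (Int × Int)) Int × Int :=
      (PySem.List.pyRange 0 n 1).foldl (fun st i =>
        let pi := PySem.List.pyGetD points i []
        let p1 : Int × Int := (PySem.List.pyGetD pi 0 0, PySem.List.pyGetD pi 1 0)
        (PySem.List.pyRange (i + 1) n 1).foldl (fun st j =>
          let pj := PySem.List.pyGetD points j []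
          let p2 : Int × Int := (PySem.List.pyGetD pj 0 0, PySem.List.pyGetD pj 1 0)
          let mid := (p1.1 + p2.1, p1.2 + p2.2)
          let slope := normalize_slope p1 p2
          let total := st.2.2 + (st.1.getD mid 0 - st.2.1.getD (mid, slope) 0)
          (st.1.modify mid 0 (· + 1), st.2.1.modify (mid, slope) 0 (· + 1), total)) st)
        (PySem.Dict.empty, PySem.Dict.empty, 0)
    st.2.2

-- ===== PRECONDITION & SPEC =====
-- Pre_ excludes only inputs where the Python raises: with len(points) >= 4 every point is
-- read as points[i][0], points[i][1], so a point of length < 2 gives IndexError in A and in B.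
def Pre_count_parallelograms_py (points : List (List Int)) : Prop :=
  points.length < 4 ∨ ∀ p ∈ points, 2 ≤ p.length
instance (points : List (List Int)) : Decidable (Pre_count_parallelograms_py points) := by
  unfold Pre_count_parallelograms_py; infer_instance
def pvWitness_count_parallelograms_py : List (List Int) := [[0, 0], [0, 1], [1, 0], [1, 1]]

def Spec_count_parallelograms_py (points : List (List Int)) (out : Int) : Prop := out = count_parallelograms_py_alt points
instance (points : List (List Int)) (out : Int) : Decidable (Spec_count_parallelograms_py points out) := by unfold Spec_count_parallelograms_py; infer_instance

-- ===== CLAIM (what is proved, stated in full; the proofs are below) =====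
def Claim_equal_count_parallelograms_py : Prop := ∀ (points : List (List Int)), Dom_count_parallelograms_py points → Pre_count_parallelograms_py points → Spec_count_parallelograms_py points (count_parallelograms_py points)

-- ===== LEMMAS AND PROOFS =====

-- the (midpoint, slope) pair of the segment (i, j), as both loops compute it
def pvEdge (points : List (List Int)) (i j : Int) : (Int × Int) × (Int × Int) :=
  let pi := PySem.List.pyGetD points i []
  let p1 : Int × Int := (PySem.List.pyGetD pi 0 0, PySem.List.pyGetD pi 1 0)
  let pj := PySem.List.pyGetD points j []
  let p2 : Int × Int := (PySem.List.pyGetD pj 0 0, PySem.List.pyGetD pj 1 0)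
  ((p1.1 + p2.1, p1.2 + p2.2), normalize_slope p1 p2)

def pvEdges (points : List (List Int)) : List ((Int × Int) × (Int × Int)) :=
  (PySem.List.pyRange 0 (PySem.List.len points) 1).flatMap (fun i =>
    (PySem.List.pyRange (i + 1) (PySem.List.len points) 1).map (pvEdge points i))

def pvAStep (d : PySem.Dict (Int × Int) (PySem.Dict (Int × Int) Int))
    (e : (Int × Int) × (Int × Int)) : PySem.Dict (Int × Int) (PySem.Dict (Int × Int) Int) :=
  d.modify e.1 PySem.Dict.empty (fun inner => inner.modify e.2 0 (· + 1))

def pvBStep (st : PySem.Dict (Int × Int) Int × PySem.Dict ((Int × Int) × (Int × Int)) Int × Int)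
    (e : (Int × Int) × (Int × Int)) :
    PySem.Dict (Int × Int) Int × PySem.Dict ((Int × Int) × (Int × Int)) Int × Int :=
  (st.1.modify e.1 0 (· + 1), st.2.1.modify e 0 (· + 1),
   st.2.2 + (st.1.getD e.1 0 - st.2.1.getD e 0))

-- B's running total over the remaining edges l, given the already processed prefix p
def pvX (p l : List ((Int × Int) × (Int × Int))) : Int :=
  match l with
  | [] => 0
  | e :: l' => (((p.countP (fun x => x.1 = e.1)) : Int) - ((p.count e) : Int)) + pvX (p ++ [e]) l'

def pvSlopesAt (l : List ((Int × Int) × (Int × Int))) (m : Int × Int) : List (Int × Int) :=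
  (l.filter (fun e => e.1 = m)).map Prod.snd

-- A's per-midpoint contribution, in terms of the slope multiset of that midpoint
def pvG (xs : List (Int × Int)) : Int :=
  (xs.length.choose 2 : Int) -
    ((PySem.Set.ofList xs).map (fun s => ((xs.count s).choose 2 : Int))).sum

def pvAval (l : List ((Int × Int) × (Int × Int))) : Int :=
  ((PySem.Set.ofList (l.map Prod.fst)).map (fun m => pvG (pvSlopesAt l m))).sum

lemma pvCount_snoc {α : Type} [BEq α] [LawfulBEq α] [DecidableEq α] (xs : List α) (y t : α) :
    (xs ++ [y]).count t = xs.count t + (if y = t then 1 else 0) := by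
  by_cases h : y = t <;> simp [List.count_append, h]

-- List.count with any lawful BEq agrees with the DecidableEq one
lemma pvCount_congr {α : Type} [DecidableEq α] [inst : BEq α] [LawfulBEq α] (x : α) (xs : List α) :
    @List.count α inst x xs = @List.count α instBEqOfDecidableEq x xs := by
  induction xs with
  | nil => rfl
  | cons a xs ih =>
    simp only [List.count_cons, ih]
    by_cases h : a = x <;> simp [h]

lemma pvA_loop (points : List (List Int)) (d : PySem.Dict (Int × Int) (PySem.Dict (Int × Int) Int)) :
    (PySem.List.pyRange 0 (PySem.List.len points) 1).foldl (fun d i =>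
        let pi := PySem.List.pyGetD points i []
        let p1 : Int × Int := (PySem.List.pyGetD pi 0 0, PySem.List.pyGetD pi 1 0)
        (PySem.List.pyRange (i + 1) (PySem.List.len points) 1).foldl (fun d j =>
          let pj := PySem.List.pyGetD points j []
          let p2 : Int × Int := (PySem.List.pyGetD pj 0 0, PySem.List.pyGetD pj 1 0)
          let mid := (p1.1 + p2.1, p1.2 + p2.2)
          let slope := normalize_slope p1 p2
          d.modify mid PySem.Dict.empty (fun inner => inner.modify slope 0 (· + 1))) d) d
    = (pvEdges points).foldl pvAStep d := by
  unfold pvEdges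
  rw [List.foldl_flatMap]
  simp only [List.foldl_map]
  rfl

lemma pvB_loop (points : List (List Int))
    (st : PySem.Dict (Int × Int) Int × PySem.Dict ((Int × Int) × (Int × Int)) Int × Int) :
    (PySem.List.pyRange 0 (PySem.List.len points) 1).foldl (fun st i =>
        let pi := PySem.List.pyGetD points i []
        let p1 : Int × Int := (PySem.List.pyGetD pi 0 0, PySem.List.pyGetD pi 1 0)
        (PySem.List.pyRange (i + 1) (PySem.List.len points) 1).foldl (fun st j =>
          let pj := PySem.List.pyGetD points j []
          let p2 : Int × Int := (PySem.List.pyGetD pj 0 0, PySem.List.pyGetD pj 1 0)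
          let mid := (p1.1 + p2.1, p1.2 + p2.2)
          let slope := normalize_slope p1 p2
          let total := st.2.2 + (st.1.getD mid 0 - st.2.1.getD (mid, slope) 0)
          (st.1.modify mid 0 (· + 1), st.2.1.modify (mid, slope) 0 (· + 1), total)) st) st
    = (pvEdges points).foldl pvBStep st := by
  unfold pvEdges
  rw [List.foldl_flatMap]
  simp only [List.foldl_map]
  rfl

lemma pvB_run (l p : List ((Int × Int) × (Int × Int)))
    (mt : PySem.Dict (Int × Int) Int) (ms : PySem.Dict ((Int × Int) × (Int × Int)) Int) (t : Int)
    (hmt : ∀ m, mt.getD m 0 = ((p.countP (fun x => x.1 = m)) : Int))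
    (hms : ∀ e, ms.getD e 0 = ((p.count e) : Int)) :
    (l.foldl pvBStep (mt, ms, t)).2.2 = t + pvX p l := by
  induction l generalizing p mt ms t with
  | nil => simp [pvX]
  | cons e l ih =>
    simp only [List.foldl_cons, pvX]
    rw [ih (p ++ [e]) _ _ _ ?_ ?_]
    · unfold pvBStep
      rw [hmt, hms]; ring
    · intro m
      unfold pvBStep
      rw [PySem.Dict.getD_modify]
      by_cases hm : m = e.1
      · subst hm
        rw [if_pos rfl, hmt]
        simp [List.countP_append]
      · rw [if_neg hm, hmt]
        have h2 : ¬ (e.1 = m) := fun h => hm h.symm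
        simp [List.countP_append, h2]
    · intro e'
      unfold pvBStep
      rw [PySem.Dict.getD_modify]
      by_cases he : e' = e
      · subst he
        rw [if_pos rfl, hms, pvCount_snoc, if_pos rfl]
        push_cast; ring
      · rw [if_neg he, hms, pvCount_snoc, if_neg (fun h => he h.symm)]
        simp

lemma pvA_getD_build (l : List ((Int × Int) × (Int × Int)))
    (d : PySem.Dict (Int × Int) (PySem.Dict (Int × Int) Int)) (m : Int × Int) :
    (l.foldl pvAStep d).getD m PySem.Dict.empty
      = ((l.filter (fun e => e.1 = m)).map Prod.snd).foldl
          (fun dd s => dd.modify s 0 (· + 1)) (d.getD m PySem.Dict.empty) := by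
  induction l generalizing d with
  | nil => simp
  | cons e l ih =>
    simp only [List.foldl_cons, List.filter_cons]
    rw [ih]
    by_cases hm : e.1 = m
    · simp only [hm, decide_true, if_true, List.map_cons, List.foldl_cons]
      congr 1
      unfold pvAStep
      rw [PySem.Dict.getD_modify]
      simp [hm]
    · simp only [hm, decide_false]
      congr 1
      unfold pvAStep
      rw [PySem.Dict.getD_modify]
      have : m ≠ e.1 := fun h => hm h.symm
      simp [this]

lemma pvA_keys_build (l : List ((Int × Int) × (Int × Int))) :
    (l.foldl pvAStep PySem.Dict.empty).keys = PySem.Set.ofList (l.map Prod.fst) := by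
  have h := PySem.Dict.keys_foldl_modify_key l Prod.fst PySem.Dict.empty
    (fun _ e (inner : PySem.Dict (Int × Int) Int) => inner.modify e.2 0 (· + 1)) PySem.Dict.empty
  have h2 : PySem.Set.update
      (PySem.Dict.empty : PySem.Dict (Int × Int) (PySem.Dict (Int × Int) Int)).keys
      (l.map Prod.fst) = PySem.Set.ofList (l.map Prod.fst) := by
    rw [PySem.Dict.keys_empty, PySem.Set.update_nil_left]
  unfold pvAStep
  exact h.trans h2

lemma pvC2_natCast (n : Nat) :
    PySem.Int.floordiv ((n : Int) * ((n : Int) - 1)) 2 = (n.choose 2 : Int) := by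
  cases n with
  | zero => decide
  | succ n =>
    have h1 : ((n + 1 : Nat) : Int) * (((n + 1 : Nat) : Int) - 1) = (((n + 1) * n : Nat) : Int) := by
      push_cast; ring
    rw [h1, PySem.Int.floordiv_eq_ediv_of_pos (by omega)]
    rw [show ((2 : Int) = ((2 : Nat) : Int)) from rfl, ← Int.natCast_div]
    rw [Nat.choose_two_right]
    simp

lemma pvSum_counts (xs : List (Int × Int)) :
    (((PySem.Set.ofList xs).map (fun k => xs.count k)).sum) = xs.length := by
  have hperm : (PySem.Set.ofList xs).Perm xs.dedup := by
    rw [List.perm_ext_iff_of_nodup (PySem.Set.nodup_ofList xs) xs.nodup_dedup]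
    intro a
    rw [PySem.Set.mem_ofList, List.mem_dedup]
  calc ((PySem.Set.ofList xs).map (fun k => xs.count k)).sum
      = (xs.dedup.map (fun k => xs.count k)).sum := (hperm.map _).sum_eq
    _ = (xs.dedup.map (fun k => @List.count _ instBEqOfDecidableEq k xs)).sum := by
        refine congrArg List.sum (List.map_congr_left ?_)
        intro k _
        exact pvCount_congr k xs
    _ = xs.length := by simpa using List.sum_map_count_dedup_eq_length xs

-- A's per-midpoint computation on the inner counter equals pvG of its slope list
lemma pvTerm_eq (xs : List (Int × Int)) :
    (calc_combination_pairs (PySem.Dict.counter xs).values).1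
      - (calc_combination_pairs (PySem.Dict.counter xs).values).2 = pvG xs := by
  unfold calc_combination_pairs pvG
  simp only [PySem.Dict.values, PySem.Dict.items_counter, List.map_map]
  have hcomp : ((fun (p : (Int × Int) × Int) => p.2) ∘ fun k => (k, ((xs.count k : Nat) : Int)))
      = fun k => ((xs.count k : Nat) : Int) := rfl
  have hsum : ((PySem.Set.ofList xs).map (fun k => ((xs.count k : Nat) : Int))).sum
      = (xs.length : Int) := by
    rw [show (fun k => ((xs.count k : Nat) : Int)) = (Nat.cast ∘ fun k => xs.count k) from rfl]
    rw [← List.map_map, ← Nat.cast_list_sum, pvSum_counts]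
  rw [hcomp, hsum, pvC2_natCast]
  congr 1
  refine congrArg List.sum (List.map_congr_left ?_)
  intro m _
  simp only [Function.comp_apply]
  exact pvC2_natCast (xs.count m)

-- value of A's second pass
lemma pvA_total (l : List ((Int × Int) × (Int × Int))) :
    (l.foldl pvAStep PySem.Dict.empty).keys.foldl (fun total mid =>
      total + ((calc_combination_pairs
          (((l.foldl pvAStep PySem.Dict.empty).getD mid PySem.Dict.empty).values)).1
        - (calc_combination_pairs
          (((l.foldl pvAStep PySem.Dict.empty).getD mid PySem.Dict.empty).values)).2)) 0
      = pvAval l := by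
  rw [PySem.List.foldl_add
    (g := fun mid =>
      ((calc_combination_pairs (((l.foldl pvAStep PySem.Dict.empty).getD mid PySem.Dict.empty).values)).1
        - (calc_combination_pairs (((l.foldl pvAStep PySem.Dict.empty).getD mid PySem.Dict.empty).values)).2))]
  rw [zero_add, pvA_keys_build]
  unfold pvAval
  refine congrArg List.sum (List.map_congr_left ?_)
  intro m _
  rw [pvA_getD_build, PySem.Dict.getD_empty, ← PySem.Dict.counter_eq_foldl]
  exact pvTerm_eq (pvSlopesAt l m)

-- sum over a nodup list of a function changed at a single member
lemma pvSum_single_change {α : Type} [DecidableEq α] (L : List α) (hnd : L.Nodup)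
    (f h : α → Int) (m0 : α) (hm : m0 ∈ L) (hne : ∀ x ∈ L, x ≠ m0 → f x = h x) :
    (L.map f).sum = (L.map h).sum + (f m0 - h m0) := by
  induction L with
  | nil => cases hm
  | cons a L ih =>
    rcases List.nodup_cons.mp hnd with ⟨ha, hL⟩
    rcases List.mem_cons.mp hm with h0 | h0
    · subst h0
      simp only [List.map_cons, List.sum_cons]
      have heq : (L.map f).sum = (L.map h).sum := by
        refine congrArg List.sum (List.map_congr_left ?_)
        intro x hx
        exact hne x (List.mem_cons_of_mem _ hx) (fun hxe => ha (hxe ▸ hx))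
      rw [heq]; ring
    · have hane : a ≠ m0 := fun h => ha (h ▸ h0)
      simp only [List.map_cons, List.sum_cons]
      rw [ih hL h0 (fun x hx hxm => hne x (List.mem_cons_of_mem _ hx) hxm)]
      rw [hne a (List.mem_cons_self) hane]
      ring

lemma pvG_snoc (xs : List (Int × Int)) (s : Int × Int) :
    pvG (xs ++ [s]) = pvG xs + (xs.length : Int) - ((xs.count s) : Int) := by
  unfold pvG
  have hlen : (xs ++ [s]).length = xs.length + 1 := by simp
  have hch : ((xs.length + 1).choose 2 : Int) = (xs.length.choose 2 : Int) + (xs.length : Int) := by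
    rw [Nat.choose_succ_succ, Nat.choose_one_right]; push_cast; ring
  rw [hlen, hch, PySem.Set.ofList_append_singleton]
  by_cases hs : s ∈ xs
  · rw [PySem.Set.add_of_mem ((PySem.Set.mem_ofList _ _).mpr hs)]
    have hstep := pvSum_single_change (PySem.Set.ofList xs) (PySem.Set.nodup_ofList xs)
      (fun t => (((xs ++ [s]).count t).choose 2 : Int))
      (fun t => ((xs.count t).choose 2 : Int)) s ((PySem.Set.mem_ofList _ _).mpr hs)
      (by
        intro t _ hts
        have h1 : ¬ (s = t) := fun h => hts h.symm
        simp [h1])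
    rw [hstep]
    have hc : (xs ++ [s]).count s = xs.count s + 1 := by simp
    simp only [hc, Nat.choose_succ_succ, Nat.choose_one_right]
    push_cast; ring
  · rw [PySem.Set.add_of_not_mem (fun h => hs ((PySem.Set.mem_ofList _ _).mp h))]
    have h0 : xs.count s = 0 := List.count_eq_zero.mpr hs
    have hnew : (xs ++ [s]).count s = 1 := by simp [h0]
    have hold : ((PySem.Set.ofList xs).map (fun t => (((xs ++ [s]).count t).choose 2 : Int)))
        = ((PySem.Set.ofList xs).map (fun t => ((xs.count t).choose 2 : Int))) := by
      refine List.map_congr_left ?_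
      intro t ht
      have hts : ¬ (s = t) := fun h => hs (h ▸ (PySem.Set.mem_ofList _ _).mp ht)
      simp [hts]
    simp only [List.map_append, List.sum_append, List.map_cons, List.map_nil, List.sum_cons,
      List.sum_nil, hold, hnew, h0]
    norm_num
    ring

lemma pvSlopes_snoc (l : List ((Int × Int) × (Int × Int))) (e : (Int × Int) × (Int × Int))
    (m : Int × Int) :
    pvSlopesAt (l ++ [e]) m = pvSlopesAt l m ++ (if e.1 = m then [e.2] else []) := by
  unfold pvSlopesAt
  rw [List.filter_append]
  by_cases h : e.1 = m <;> simp [h]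

lemma pvSlopes_len (l : List ((Int × Int) × (Int × Int))) (m : Int × Int) :
    (pvSlopesAt l m).length = l.countP (fun x => x.1 = m) := by
  unfold pvSlopesAt
  rw [List.length_map, List.countP_eq_length_filter]

lemma pvSlopes_count (l : List ((Int × Int) × (Int × Int))) (e : (Int × Int) × (Int × Int)) :
    (pvSlopesAt l e.1).count e.2 = l.count e := by
  unfold pvSlopesAt
  induction l with
  | nil => simp
  | cons x l ih =>
    by_cases h1 : x.1 = e.1
    · rw [List.filter_cons_of_pos (by simp [h1])]
      rw [List.map_cons, List.count_cons, List.count_cons, ih]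
      by_cases h2 : x = e
      · subst h2; simp
      · have h3 : ¬ (x.2 = e.2) := by
          intro h4
          exact h2 (Prod.ext h1 h4)
        simp [h2, h3]
    · rw [List.filter_cons_of_neg (by simp [h1])]
      rw [ih, List.count_cons]
      have h2 : ¬ (x = e) := fun h => h1 (by rw [h])
      simp [h2]

lemma pvAval_snoc (l : List ((Int × Int) × (Int × Int))) (e : (Int × Int) × (Int × Int)) :
    pvAval (l ++ [e]) = pvAval l + ((l.countP (fun x => x.1 = e.1)) : Int) - ((l.count e) : Int) := by
  unfold pvAval
  rw [List.map_append, List.map_cons, List.map_nil, PySem.Set.ofList_append_singleton]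
  by_cases hm : e.1 ∈ l.map Prod.fst
  · rw [PySem.Set.add_of_mem ((PySem.Set.mem_ofList _ _).mpr hm)]
    have hstep := pvSum_single_change (PySem.Set.ofList (l.map Prod.fst))
      (PySem.Set.nodup_ofList _)
      (fun m => pvG (pvSlopesAt (l ++ [e]) m)) (fun m => pvG (pvSlopesAt l m))
      e.1 ((PySem.Set.mem_ofList _ _).mpr hm)
      (by
        intro m _ hme
        have h1 : ¬ (e.1 = m) := fun h => hme h.symm
        simp [pvSlopes_snoc, h1])
    rw [hstep]
    have hterm : pvG (pvSlopesAt (l ++ [e]) e.1)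
        = pvG (pvSlopesAt l e.1) + ((l.countP (fun x => x.1 = e.1)) : Int)
          - ((l.count e) : Int) := by
      rw [pvSlopes_snoc, if_pos rfl, pvG_snoc, pvSlopes_len, pvSlopes_count]
    simp only [hterm]
    ring
  · rw [PySem.Set.add_of_not_mem (fun h => hm ((PySem.Set.mem_ofList _ _).mp h))]
    have hnil : pvSlopesAt l e.1 = [] := by
      unfold pvSlopesAt
      rw [List.filter_eq_nil_iff.mpr, List.map_nil]
      intro x hx hfx
      exact hm (List.mem_map.mpr ⟨x, hx, of_decide_eq_true hfx⟩)
    have hcp : l.countP (fun x => x.1 = e.1) = 0 := by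
      rw [← pvSlopes_len, hnil, List.length_nil]
    have hc : l.count e = 0 := by
      rw [← pvSlopes_count, hnil, List.count_nil]
    have hold : ((PySem.Set.ofList (l.map Prod.fst)).map (fun m => pvG (pvSlopesAt (l ++ [e]) m)))
        = ((PySem.Set.ofList (l.map Prod.fst)).map (fun m => pvG (pvSlopesAt l m))) := by
      refine List.map_congr_left ?_
      intro m hmm
      have hme : ¬ (e.1 = m) := fun h => hm (h ▸ (PySem.Set.mem_ofList _ _).mp hmm)
      simp [pvSlopes_snoc, hme]
    have hnewterm : pvG (pvSlopesAt (l ++ [e]) e.1) = 0 := by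
      rw [pvSlopes_snoc, if_pos rfl, hnil]
      rw [pvG_snoc]
      simp [pvG]
    simp only [List.map_append, List.sum_append, List.map_cons, List.map_nil, List.sum_cons,
      List.sum_nil, hold, hnewterm, hcp, hc]
    ring

lemma pvX_snoc (l p : List ((Int × Int) × (Int × Int))) (e : (Int × Int) × (Int × Int)) :
    pvX p (l ++ [e]) = pvX p l + (((p ++ l).countP (fun x => x.1 = e.1)) : Int)
      - (((p ++ l).count e) : Int) := by
  induction l generalizing p with
  | nil =>
    simp only [List.nil_append, List.append_nil, pvX]
    ring
  | cons x l ih =>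
    simp only [List.cons_append, pvX]
    rw [ih (p ++ [x])]
    rw [List.append_assoc, List.singleton_append]
    ring

lemma pvMain (l : List ((Int × Int) × (Int × Int))) : pvAval l = pvX [] l := by
  induction l using List.reverseRecOn with
  | nil => simp [pvAval, pvX]
  | append_singleton l e ih =>
    rw [pvAval_snoc, pvX_snoc, List.nil_append, ih]

-- ===== VERDICT (by name: the statement is the Claim_ definition above) =====
theorem count_parallelograms_py_spec : Claim_equal_count_parallelograms_py := by
  intro points _ _
  unfold Spec_count_parallelograms_py
  simp only [count_parallelograms_py, count_parallelograms_py_alt]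
  rw [pvA_loop points PySem.Dict.empty, pvB_loop points (PySem.Dict.empty, PySem.Dict.empty, 0)]
  rw [pvA_total, pvB_run (pvEdges points) [] PySem.Dict.empty PySem.Dict.empty 0
    (by intro m; simp) (by intro e; simp)]
  rw [pvMain, zero_add]
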